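-- pv_equiv track=rewrite | github.com/chulbioinfo/ConVarFinder | bin/ConVarFinder_final.py | make_MRCA_targetID_dic
-- ===== SOURCE A (Python) =====
-- def reordering_targetID_list(terNode_list, targetID_list, MonophyleticPair_list):
--   tmp_targetID_list = []
--   mono_list = []
--   poly_list = []
--   for targetID in terNode_list:
--     if targetID in targetID_list:
--       if targetID in MonophyleticPair_list:
--         mono_list.append(targetID)
--       else:
--         poly_list.append(targetID)
--   for targetID in mono_list:
--     tmp_targetID_list.append(targetID)
--   for targetID in poly_list:
--     tmp_targetID_list.append(targetID)
--   return(tmp_targetID_list)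
--
-- def remove_ID_from_list(tmp_targetID_list,tmp_targetID):
--   iPos_LastElement  = len(tmp_targetID_list)-1
--   iPos_tmp_targetID = tmp_targetID_list.index(tmp_targetID)
--   tmp_targetID_list[iPos_tmp_targetID]  = tmp_targetID_list[iPos_LastElement]
--   tmp_targetID_list[iPos_LastElement]   = tmp_targetID
--   tmp_targetID_list = tmp_targetID_list[:-1]
--   return(tmp_targetID_list)
--
-- def find_monophyletic_clade(sID_mID_dic, ref_targetID, targetID_list, targetID_mID_dic):
--   ## First time of the reference target
--   iFlag = 0
--   iFlag_End_MARCA_targetID = False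
--   if not ref_targetID in targetID_mID_dic.keys():
--     for tmp_targetID in targetID_list:
--       if not ref_targetID == tmp_targetID:
--         ### case finding monophyletic pairs within target list
--         if sID_mID_dic[ref_targetID] == sID_mID_dic[tmp_targetID]:
--           iFlag= 1
--           if ref_targetID in targetID_list:
--             targetID_list = remove_ID_from_list(targetID_list, ref_targetID)
--           targetID_list = remove_ID_from_list(targetID_list, tmp_targetID)
--           mID = sID_mID_dic[ref_targetID]
--           targetID_mID_dic.setdefault(ref_targetID,mID)
--           targetID_mID_dic.setdefault(tmp_targetID,mID)
--           return(targetID_list, targetID_mID_dic, iFlag_End_MARCA_targetID)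
--     ### case without monophyletic pairs within target list
--     if iFlag == 0:
--       mID = ref_targetID
--       targetID_mID_dic.setdefault(ref_targetID,mID)
--       targetID_list = remove_ID_from_list(targetID_list, ref_targetID)
--       iFlag_End_MARCA_targetID = True
--       return(targetID_list, targetID_mID_dic, iFlag_End_MARCA_targetID)
--   ## Next time of the reference target
--   else:
--     ref_mID = targetID_mID_dic[ref_targetID]
--     for tmp_targetID in targetID_list:
--       ### case finding additional monophyletic species in target list
--       if sID_mID_dic[ref_mID] == sID_mID_dic[tmp_targetID]:
--         iFlag = 1
--         targetID_list = remove_ID_from_list(targetID_list, tmp_targetID)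
--         mID = sID_mID_dic[ref_mID]
--         for targetID in targetID_mID_dic.keys():
--           targetID_mID_dic[targetID] = mID
--         targetID_mID_dic.setdefault(tmp_targetID,mID)
--         return(targetID_list, targetID_mID_dic, iFlag_End_MARCA_targetID)
--     ### case without additional monophyletic species within target list
--     if iFlag == 0:
--       iFlag_End_MARCA_targetID = True
--       return(targetID_list, targetID_mID_dic, iFlag_End_MARCA_targetID)
--
-- def make_MRCA_targetID_dic(sID_mID_dic, ref_targetID, targetID_list, targetID_mID_dic, mID_targetID_dic, terNode_list, MonophyleticPair_list):
--   targetID_list, targetID_mID_dic, iFlag_End_MARCA_targetID = find_monophyletic_clade(sID_mID_dic, ref_targetID, targetID_list, targetID_mID_dic)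
--
--   if iFlag_End_MARCA_targetID == True:
--     for targetID in targetID_mID_dic.keys():
--         mID = targetID_mID_dic[targetID]
--         mID_targetID_dic.setdefault(mID,[])
--         mID_targetID_dic[mID].append(targetID)
--     targetID_mID_dic = {}
--     if len(targetID_list) > 0:
--       targetID_list = reordering_targetID_list(terNode_list, targetID_list ,MonophyleticPair_list)
--     return(targetID_list, targetID_mID_dic, mID_targetID_dic)
--   else:
--     ### Recursive function
--     targetID_list, targetID_mID_dic, mID_targetID_dic = make_MRCA_targetID_dic(sID_mID_dic, ref_targetID, targetID_list, targetID_mID_dic, mID_targetID_dic, terNode_list, MonophyleticPair_list)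
--     targetID_list = reordering_targetID_list(terNode_list, targetID_list,MonophyleticPair_list)
--     return(targetID_list, targetID_mID_dic, mID_targetID_dic)
-- ===== SOURCE B (Python) =====
-- # B: one self-contained function -- an explicit first step plus a while loop replace A's
-- # recursion (A's per-unwind reorders are idempotent, so one reorder at the end suffices);
-- # removal and the final reorder are written as comprehensions.  Equivalence is about the
-- # RETURN value: B mutates only mID_targetID_dic, not targetID_list / targetID_mID_dic.
--
-- def make_MRCA_targetID_dic(sID_mID_dic, ref_targetID, targetID_list, targetID_mID_dic, mID_targetID_dic, terNode_list, MonophyleticPair_list):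
--   L = targetID_list
--   d = dict(targetID_mID_dic)
--
--   def swap_out(lst, x):
--     # remove x by moving the last element into x's slot and dropping the tail
--     j = lst.index(x)
--     return [lst[-1] if k == j else lst[k] for k in range(len(lst) - 1)]
--
--   done = False
--   if ref_targetID not in d:
--     hit = next((t for t in L if t != ref_targetID
--                 and sID_mID_dic[ref_targetID] == sID_mID_dic[t]), None)
--     if hit is None:
--       d[ref_targetID] = ref_targetID
--       L = swap_out(L, ref_targetID)
--       done = True
--     else:
--       if ref_targetID in L:
--         L = swap_out(L, ref_targetID)
--       L = swap_out(L, hit)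
--       m = sID_mID_dic[ref_targetID]
--       d.setdefault(ref_targetID, m)
--       d.setdefault(hit, m)
--   while not done:
--     mom = d[ref_targetID]
--     hit = next((t for t in L if sID_mID_dic[mom] == sID_mID_dic[t]), None)
--     if hit is None:
--       done = True
--     else:
--       L = swap_out(L, hit)
--       m = sID_mID_dic[mom]
--       for k in d:
--         d[k] = m
--       d.setdefault(hit, m)
--   for t in d:
--     mID_targetID_dic.setdefault(d[t], []).append(t)
--   if L:
--     L = ([t for t in terNode_list if t in L and t in MonophyleticPair_list]
--          + [t for t in terNode_list if t in L and t not in MonophyleticPair_list])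
--   return (L, {}, mID_targetID_dic)
-- ===== Notes on version B (the rewrite author's own statement) =====
-- stated objective: simpler
-- what changed: A's recursion (one reordering_targetID_list pass per unwind level) and its three helper functions are replaced by one self-contained function: an explicit first step plus a while loop that runs the find-next-clade-member step to the terminal state, with swap-removal and the single final reorder written as comprehensions (the unwind-time reorders are idempotent, so one suffices).
import Mathlib
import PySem

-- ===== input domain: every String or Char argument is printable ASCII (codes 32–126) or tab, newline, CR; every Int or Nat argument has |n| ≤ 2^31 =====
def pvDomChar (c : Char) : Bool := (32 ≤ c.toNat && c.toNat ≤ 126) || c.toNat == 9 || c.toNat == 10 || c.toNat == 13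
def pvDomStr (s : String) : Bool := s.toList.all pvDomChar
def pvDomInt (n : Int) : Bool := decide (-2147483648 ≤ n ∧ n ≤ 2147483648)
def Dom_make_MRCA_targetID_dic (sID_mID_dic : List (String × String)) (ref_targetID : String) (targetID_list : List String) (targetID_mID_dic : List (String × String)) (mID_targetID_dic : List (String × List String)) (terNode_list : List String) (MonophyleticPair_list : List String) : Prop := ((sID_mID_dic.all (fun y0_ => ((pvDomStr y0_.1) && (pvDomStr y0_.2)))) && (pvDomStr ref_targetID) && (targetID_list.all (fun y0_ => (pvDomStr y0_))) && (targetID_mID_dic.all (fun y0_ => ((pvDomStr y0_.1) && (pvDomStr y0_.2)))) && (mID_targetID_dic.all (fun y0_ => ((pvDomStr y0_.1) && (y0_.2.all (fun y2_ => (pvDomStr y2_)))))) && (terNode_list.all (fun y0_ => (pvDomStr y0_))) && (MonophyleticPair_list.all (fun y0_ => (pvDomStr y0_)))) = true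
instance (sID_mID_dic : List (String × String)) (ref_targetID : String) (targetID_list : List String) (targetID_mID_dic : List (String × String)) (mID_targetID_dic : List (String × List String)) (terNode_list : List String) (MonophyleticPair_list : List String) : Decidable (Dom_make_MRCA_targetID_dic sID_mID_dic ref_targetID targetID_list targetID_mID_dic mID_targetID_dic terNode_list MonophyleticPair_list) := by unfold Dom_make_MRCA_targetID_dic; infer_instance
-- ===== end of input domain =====

-- ===== PORT A =====

-- B replaces A's recursion (and its three module helpers) by one self-contained function:
-- an explicit first step plus a loop to the terminal state, one flush and one reorder
-- (A's per-unwind reorders are idempotent); removal and the reorder are comprehensions.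
-- Equivalence is about the RETURN value: the Pythons differ in which arguments they
-- mutate in place (A mutates targetID_list/targetID_mID_dic, B only mID_targetID_dic).

-- ===== PORT A =====
-- literal ports of the module's reordering_targetID_list, remove_ID_from_list and
-- find_monophyletic_clade (A calls them; B does not use these)
def pvReorder (terNode_list targetID_list MonophyleticPair_list : List String) : List String :=
  let mp := terNode_list.foldl (fun (acc : List String × List String) t =>
    if targetID_list.contains t then
      if MonophyleticPair_list.contains t then (acc.1 ++ [t], acc.2)
      else (acc.1, acc.2 ++ [t])
    else acc) ([], [])
  mp.1 ++ mp.2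

-- Python raises ValueError when x is absent (excluded by Pre_); dropLast there keeps the
-- length arithmetic uniform for the termination proof
def pvRemoveID (l : List String) (x : String) : List String :=
  match PySem.List.index? l x with
  | some i => ((l.set i (l.getD (l.length - 1) "")).set (l.length - 1) x).dropLast
  | none => l.dropLast

def pvFindMono (s : PySem.Dict String String) (ref : String) (L : List String)
    (d : PySem.Dict String String) : List String × PySem.Dict String String × Bool :=
  match PySem.Dict.get? d ref with
  | none =>
    match L.find? (fun t => !(ref == t) && (PySem.Dict.get? s ref == PySem.Dict.get? s t)) with
    | some tmp =>
      let L1 := if L.contains ref then pvRemoveID L ref else L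
      let L2 := pvRemoveID L1 tmp
      let mID := (PySem.Dict.get? s ref).getD ""
      let d1 := (d.setdefault ref mID).setdefault tmp mID
      (L2, d1, false)
    | none =>
      (pvRemoveID L ref, d.setdefault ref ref, true)
  | some ref_mID =>
    match L.find? (fun t => PySem.Dict.get? s ref_mID == PySem.Dict.get? s t) with
    | some tmp =>
      let L1 := pvRemoveID L tmp
      let mID := (PySem.Dict.get? s ref_mID).getD ""
      let d1 := d.update (d.keys.map (fun k => (k, mID)))
      (L1, d1.setdefault tmp mID, false)
    | none => (L, d, true)

def pvFlush (d : PySem.Dict String String) (M : PySem.Dict String (List String)) :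
    PySem.Dict String (List String) :=
  d.items.foldl (fun M kv => (M.setdefault kv.2 []).modify kv.2 [] (fun xs => xs ++ [kv.1])) M

theorem length_pvRemoveID (l : List String) (x : String) :
    (pvRemoveID l x).length = l.length - 1 := by
  unfold pvRemoveID
  cases h : PySem.List.index? l x <;> simp

theorem pvFindMono_shrink (s : PySem.Dict String String) (ref : String) (L : List String)
    (d : PySem.Dict String String) (L' : List String) (d' : PySem.Dict String String)
    (h : pvFindMono s ref L d = (L', d', false)) : L'.length < L.length := by
  unfold pvFindMono at h
  split at h <;> split at h <;> simp only [Prod.mk.injEq] at h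
  · rename_i hd tmp hf
    have hmem := List.mem_of_find?_eq_some hf
    have hpos : 0 < L.length := List.length_pos_of_mem hmem
    obtain ⟨h1, -, -⟩ := h
    subst h1
    rw [length_pvRemoveID]
    split
    · rw [length_pvRemoveID]; omega
    · omega
  · simp at h
  · rename_i hd tmp hf
    have hmem := List.mem_of_find?_eq_some hf
    have hpos : 0 < L.length := List.length_pos_of_mem hmem
    obtain ⟨h1, -, -⟩ := h
    subst h1
    rw [length_pvRemoveID]; omega
  · simp at h

-- A's recursive make_MRCA_targetID_dic (on PySem.Dict state)
def pvMRCA_A (s : PySem.Dict String String) (ref : String) (L : List String)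
    (d : PySem.Dict String String) (M : PySem.Dict String (List String))
    (ter mono : List String) :
    List String × PySem.Dict String String × PySem.Dict String (List String) :=
  match hf : pvFindMono s ref L d with
  | (L1, d1, true) =>
    (if L1.length > 0 then pvReorder ter L1 mono else L1, PySem.Dict.empty, pvFlush d1 M)
  | (L1, d1, false) =>
    let r := pvMRCA_A s ref L1 d1 M ter mono
    (pvReorder ter r.1 mono, r.2.1, r.2.2)
termination_by L.length
decreasing_by exact pvFindMono_shrink s ref L d L1 d1 hf

def make_MRCA_targetID_dic (sID_mID_dic : List (String × String)) (ref_targetID : String) (targetID_list : List String) (targetID_mID_dic : List (String × String)) (mID_targetID_dic : List (String × List String)) (terNode_list : List String) (MonophyleticPair_list : List String) : List String × (List (String × String)) × (List (String × List String)) :=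
  let r := pvMRCA_A (PySem.Dict.ofList sID_mID_dic) ref_targetID targetID_list
    (PySem.Dict.ofList targetID_mID_dic) (PySem.Dict.ofList mID_targetID_dic)
    terNode_list MonophyleticPair_list
  (r.1, r.2.1.items, r.2.2.items)

-- ===== PORT B =====
-- B's swap_out: [lst[-1] if k == j else lst[k] for k in range(len(lst)-1)]
-- (Python raises ValueError when x is absent; that is outside Pre_)
def altSwapOut (l : List String) (x : String) : List String :=
  match PySem.List.index? l x with
  | some j => (List.range (l.length - 1)).map
      (fun k => if k = j then l.getD (l.length - 1) "" else l.getD k "")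
  | none => []

-- termination measure for B's while loop (cited by altLoop's decreasing_by)
theorem length_altSwapOut_lt (l : List String) (x : String) (h : l ≠ []) :
    (altSwapOut l x).length < l.length := by
  have hpos : 0 < l.length := List.length_pos_of_ne_nil h
  unfold altSwapOut
  cases hi : PySem.List.index? l x <;> simp <;> omega

-- B's while loop; ref is a key of d whenever the loop runs (see make_MRCA_targetID_dic_alt)
def altLoop (s : PySem.Dict String String) (ref : String) (L : List String)
    (d : PySem.Dict String String) : List String × PySem.Dict String String :=
  let mom := (PySem.Dict.get? d ref).getD ""
  match hh : L.find? (fun t => PySem.Dict.get? s mom == PySem.Dict.get? s t) with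
  | none => (L, d)
  | some hit =>
    let m := (PySem.Dict.get? s mom).getD ""
    let d1 := (d.update (d.keys.map (fun k => (k, m)))).setdefault hit m
    altLoop s ref (altSwapOut L hit) d1
termination_by L.length
decreasing_by
  exact length_altSwapOut_lt L hit (List.ne_nil_of_mem (List.mem_of_find?_eq_some hh))

def make_MRCA_targetID_dic_alt (sID_mID_dic : List (String × String)) (ref_targetID : String) (targetID_list : List String) (targetID_mID_dic : List (String × String)) (mID_targetID_dic : List (String × List String)) (terNode_list : List String) (MonophyleticPair_list : List String) : List String × (List (String × String)) × (List (String × List String)) :=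
  let s := PySem.Dict.ofList sID_mID_dic
  let d0 := PySem.Dict.ofList targetID_mID_dic
  -- the explicit first step (B's 'if ref_targetID not in d' block), then the loop
  let step0 : List String × PySem.Dict String String × Bool :=
    match PySem.Dict.get? d0 ref_targetID with
    | some _ => (targetID_list, d0, false)
    | none =>
      match targetID_list.find? (fun t =>
          !(t == ref_targetID) && (PySem.Dict.get? s ref_targetID == PySem.Dict.get? s t)) with
      | none => (altSwapOut targetID_list ref_targetID,
                 d0.insert ref_targetID ref_targetID, true)
      | some hit =>
        let L1 := if targetID_list.contains ref_targetID
                  then altSwapOut targetID_list ref_targetID else targetID_list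
        let m := (PySem.Dict.get? s ref_targetID).getD ""
        (altSwapOut L1 hit, (d0.setdefault ref_targetID m).setdefault hit m, false)
  let p := if step0.2.2 then (step0.1, step0.2.1)
           else altLoop s ref_targetID step0.1 step0.2.1
  -- flush: for t in d: mID_targetID_dic.setdefault(d[t], []).append(t)
  let M1 := p.2.keys.foldl (fun M t =>
    let m := (PySem.Dict.get? p.2 t).getD ""
    (M.setdefault m []).modify m [] (fun xs => xs ++ [t])) (PySem.Dict.ofList mID_targetID_dic)
  -- if L: two comprehensions, monophyletic-pair members first
  let L2 := if p.1.isEmpty then p.1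
            else terNode_list.filter (fun t => p.1.contains t && MonophyleticPair_list.contains t)
                 ++ terNode_list.filter (fun t => p.1.contains t && !(MonophyleticPair_list.contains t))
  (L2, (PySem.Dict.empty : PySem.Dict String String).items, M1.items)

-- ===== PRECONDITION & SPEC =====
-- Pre_ admits the inputs on which Python A returns normally and excludes those on which it
-- raises (KeyError: an ID or a consulted mother-ID missing from sID_mID_dic; ValueError:
-- removing a ref_targetID that is absent from targetID_list),
-- by requiring the well-formed table shape the caller builds: targets and mapped mother-IDs
-- are keys of sID_mID_dic and sID_mID_dic's values are again keys.  The value-closedness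
-- conjunct is slightly wider than the exact raising set: it also excludes inputs whose tables
-- map to a non-key that A's scan happens never to consult (see the cited excluded examples).
def Pre_make_MRCA_targetID_dic (sID_mID_dic : List (String × String)) (ref_targetID : String) (targetID_list : List String) (targetID_mID_dic : List (String × String)) (mID_targetID_dic : List (String × List String)) (terNode_list : List String) (MonophyleticPair_list : List String) : Prop :=
  let s := PySem.Dict.ofList sID_mID_dic
  let d := PySem.Dict.ofList targetID_mID_dic
  (targetID_list = [] → d.contains ref_targetID = true) ∧
  (targetID_list ≠ [] →
    ((d.contains ref_targetID = false ∧ ∀ t ∈ targetID_list, t = ref_targetID) ∨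
     ((∀ t ∈ targetID_list, s.contains t = true) ∧
      (∀ v ∈ s.values, s.contains v = true) ∧
      (d.contains ref_targetID = true →
        s.contains ((PySem.Dict.get? d ref_targetID).getD "") = true) ∧
      (d.contains ref_targetID = false →
        s.contains ref_targetID = true ∧
        ((¬ ∃ t ∈ targetID_list, t ≠ ref_targetID ∧
            PySem.Dict.get? s t = PySem.Dict.get? s ref_targetID) →
          ref_targetID ∈ targetID_list)))))
instance (sID_mID_dic : List (String × String)) (ref_targetID : String) (targetID_list : List String) (targetID_mID_dic : List (String × String)) (mID_targetID_dic : List (String × List String)) (terNode_list : List String) (MonophyleticPair_list : List String) : Decidable (Pre_make_MRCA_targetID_dic sID_mID_dic ref_targetID targetID_list targetID_mID_dic mID_targetID_dic terNode_list MonophyleticPair_list) := by unfold Pre_make_MRCA_targetID_dic; infer_instance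

def pvWitness_make_MRCA_targetID_dic : (List (String × String)) × String × List String × (List (String × String)) × (List (String × List String)) × List String × List String :=
  ([("r", "m"), ("a", "m"), ("m", "m")], "r", ["r", "a"], [], [], ["r", "a"], [])

def Spec_make_MRCA_targetID_dic (sID_mID_dic : List (String × String)) (ref_targetID : String) (targetID_list : List String) (targetID_mID_dic : List (String × String)) (mID_targetID_dic : List (String × List String)) (terNode_list : List String) (MonophyleticPair_list : List String) (out : List String × (List (String × String)) × (List (String × List String))) : Prop := out = make_MRCA_targetID_dic_alt sID_mID_dic ref_targetID targetID_list targetID_mID_dic mID_targetID_dic terNode_list MonophyleticPair_list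
instance (sID_mID_dic : List (String × String)) (ref_targetID : String) (targetID_list : List String) (targetID_mID_dic : List (String × String)) (mID_targetID_dic : List (String × List String)) (terNode_list : List String) (MonophyleticPair_list : List String) (out : List String × (List (String × String)) × (List (String × List String))) : Decidable (Spec_make_MRCA_targetID_dic sID_mID_dic ref_targetID targetID_list targetID_mID_dic mID_targetID_dic terNode_list MonophyleticPair_list out) := by unfold Spec_make_MRCA_targetID_dic; infer_instance

-- ===== CLAIM (what is proved, stated in full; the proofs are below) =====
def Claim_equal_make_MRCA_targetID_dic : Prop := ∀ (sID_mID_dic : List (String × String)) (ref_targetID : String) (targetID_list : List String) (targetID_mID_dic : List (String × String)) (mID_targetID_dic : List (String × List String)) (terNode_list : List String) (MonophyleticPair_list : List String), Dom_make_MRCA_targetID_dic sID_mID_dic ref_targetID targetID_list targetID_mID_dic mID_targetID_dic terNode_list MonophyleticPair_list → Pre_make_MRCA_targetID_dic sID_mID_dic ref_targetID targetID_list targetID_mID_dic mID_targetID_dic terNode_list MonophyleticPair_list → Spec_make_MRCA_targetID_dic sID_mID_dic ref_targetID targetID_list targetID_mID_dic mID_targetID_dic terNode_list MonophyleticPair_list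 (make_MRCA_targetID_dic sID_mID_dic ref_targetID targetID_list targetID_mID_dic mID_targetID_dic terNode_list MonophyleticPair_list)

-- ===== LEMMAS AND PROOFS =====
-- A's recursion, iterated to the terminal state (proof-side reference loop)
def pvLoopB (s : PySem.Dict String String) (ref : String) (L : List String)
    (d : PySem.Dict String String) : List String × PySem.Dict String String :=
  match hf : pvFindMono s ref L d with
  | (L1, d1, true) => (L1, d1)
  | (L1, d1, false) => pvLoopB s ref L1 d1
termination_by L.length
decreasing_by exact pvFindMono_shrink s ref L d L1 d1 hf

theorem pvReorder_foldl (L M : List String) (ter : List String)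
    (a b : List String) :
    ter.foldl (fun (acc : List String × List String) t =>
      if L.contains t then
        if M.contains t then (acc.1 ++ [t], acc.2) else (acc.1, acc.2 ++ [t])
      else acc) (a, b) =
    (a ++ ter.filter (fun t => L.contains t && M.contains t),
     b ++ ter.filter (fun t => L.contains t && !M.contains t)) := by
  induction ter generalizing a b with
  | nil => simp
  | cons x xs ih =>
    simp only [List.foldl_cons, List.filter_cons]
    by_cases hL : L.contains x = true <;> by_cases hM : M.contains x = true <;>
      simp only [hL, hM, Bool.not_true, Bool.not_false, Bool.and_false, Bool.and_true,
        if_true] <;> rw [ih] <;> simp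

theorem pvReorder_eq (ter L M : List String) :
    pvReorder ter L M = ter.filter (fun t => L.contains t && M.contains t) ++
      ter.filter (fun t => L.contains t && !M.contains t) := by
  simp only [pvReorder, pvReorder_foldl, List.nil_append]

theorem pvReorder_nil (ter M : List String) : pvReorder ter [] M = [] := by
  simp [pvReorder_eq]

theorem mem_pvReorder (ter L M : List String) (x : String) :
    x ∈ pvReorder ter L M ↔ x ∈ ter ∧ x ∈ L := by
  simp only [pvReorder_eq, List.mem_append, List.mem_filter, Bool.and_eq_true,
    List.contains_iff_mem]
  by_cases hM : x ∈ M <;> simp [hM]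

theorem contains_pvReorder (ter L M : List String) (x : String) :
    (pvReorder ter L M).contains x = (ter.contains x && L.contains x) := by
  rw [Bool.eq_iff_iff]
  simp [mem_pvReorder]

theorem pvReorder_idem (ter L M : List String) :
    pvReorder ter (pvReorder ter L M) M = pvReorder ter L M := by
  conv_lhs => rw [pvReorder_eq]
  conv_rhs => rw [pvReorder_eq]
  have hfil : ∀ (f : String → Bool),
      ter.filter (fun t => (pvReorder ter L M).contains t && f t) =
      ter.filter (fun t => L.contains t && f t) := by
    intro f
    refine List.filter_congr (fun x hx => ?_)
    rw [contains_pvReorder]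
    have hter : ter.contains x = true := by simpa using hx
    rw [hter, Bool.true_and]
  rw [hfil (fun t => M.contains t), hfil (fun t => !M.contains t)]

-- A's recursion collapses to the loop, one flush and one reorder
theorem core_eq (s : PySem.Dict String String) (ref : String) (L : List String)
    (d : PySem.Dict String String) (M : PySem.Dict String (List String))
    (ter mono : List String) :
    pvMRCA_A s ref L d M ter mono =
      (if (pvLoopB s ref L d).1.length > 0 then pvReorder ter (pvLoopB s ref L d).1 mono
       else (pvLoopB s ref L d).1,
       PySem.Dict.empty, pvFlush (pvLoopB s ref L d).2 M) := by
  fun_induction pvMRCA_A s ref L d M ter mono with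
  | case1 L d L1 d1 hf =>
    rw [pvLoopB, hf]
  | case2 L d L1 d1 hf r ih =>
    have hr : r = pvMRCA_A s ref L1 d1 M ter mono := rfl
    rw [pvLoopB, hf]
    rw [hr, ih]
    by_cases hnil : (pvLoopB s ref L1 d1).1 = []
    · simp [hnil, pvReorder_nil]
    · have hlen : 0 < (pvLoopB s ref L1 d1).1.length := List.length_pos_of_ne_nil hnil
      simp [hlen, pvReorder_idem]

-- B's swap_out comprehension computes A's remove_ID_from_list whenever x is present
theorem altSwapOut_eq (l : List String) (x : String) (hx : x ∈ l) :
    altSwapOut l x = pvRemoveID l x := by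
  obtain ⟨j, hj⟩ := Option.isSome_iff_exists.1 ((PySem.List.index?_isSome_iff l x).2 hx)
  obtain ⟨hjlt, hlj, -⟩ := PySem.List.getElem_of_index?_eq_some hj
  unfold altSwapOut pvRemoveID
  rw [hj]
  apply List.ext_getElem
  · simp
  · intro k hk1 hk2
    have hk' : k < l.length - 1 := by simpa using hk1
    simp only [List.getElem_map, List.getElem_range]
    rw [List.getElem_dropLast]
    rw [List.getElem_set_ne (by simp; omega)]
    rw [List.getElem_set]
    have hgd : l.getD k "" = l[k] := List.getD_eq_getElem l "" (by omega)
    rw [hgd]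
    by_cases h : k = j
    · simp [h]
    · simp [h, Ne.symm h]

-- swap-removal of y keeps every other member
theorem mem_pvRemoveID_of_ne (l : List String) (x y : String) (hx : x ∈ l)
    (hy : y ∈ l) (hne : x ≠ y) : x ∈ pvRemoveID l y := by
  obtain ⟨i, hi⟩ := Option.isSome_iff_exists.1 ((PySem.List.index?_isSome_iff l y).2 hy)
  obtain ⟨hilt, hli, -⟩ := PySem.List.getElem_of_index?_eq_some hi
  obtain ⟨k, hk, hek⟩ := List.mem_iff_getElem.1 hx
  have hki : k ≠ i := by
    intro h; subst h; exact hne (by rw [← hek]; exact hli)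
  unfold pvRemoveID
  rw [hi]
  apply List.mem_iff_getElem.2
  by_cases hlast : k < l.length - 1
  · refine ⟨k, by simp; omega, ?_⟩
    rw [List.getElem_dropLast, List.getElem_set_ne (by simp; omega),
        List.getElem_set_ne (by omega)]
    exact hek
  · -- k = l.length - 1; then i < l.length - 1 and position i holds l[l.length-1] = x
    have hkeq : k = l.length - 1 := by omega
    have hilt' : i < l.length - 1 := by omega
    refine ⟨i, by simp; omega, ?_⟩
    rw [List.getElem_dropLast, List.getElem_set_ne (by simp; omega),
        List.getElem_set_self (by simp; omega)]
    rw [List.getD_eq_getElem l "" (by omega)]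
    rw [← hek]
    congr 1
    omega

theorem nodup_keys_setdefault (d : PySem.Dict String String) (k v : String)
    (h : d.keys.Nodup) : (d.setdefault k v).keys.Nodup := by
  by_cases hc : d.contains k = true
  · rw [PySem.Dict.setdefault_of_contains d v hc]; exact h
  · rw [PySem.Dict.setdefault_of_not_contains d v (by simpa using hc)]
    exact PySem.Dict.nodup_keys_insert _ _ _ h

theorem overwrite_keys (d : PySem.Dict String String) (m : String) :
    (d.update (d.keys.map (fun k => (k, m)))).keys = PySem.Set.update d.keys d.keys := by
  show ((d.keys.map (fun k => (k, m))).foldl (fun acc p => acc.insert p.1 p.2) d).keys = _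
  rw [PySem.Dict.keys_foldl_insert_key _ Prod.fst (fun _ p => p.2) d]
  simp [Function.comp_def]

theorem contains_overwrite (d : PySem.Dict String String) (m hit ref : String)
    (h : d.contains ref = true) :
    ((d.update (d.keys.map (fun k => (k, m)))).setdefault hit m).contains ref = true := by
  rw [PySem.Dict.contains_setdefault]
  have h2 : (d.update (d.keys.map (fun k => (k, m)))).contains ref = true := by
    rw [PySem.Dict.contains_iff_mem_keys, overwrite_keys]
    exact (PySem.Set.mem_update _ _ _).2 (Or.inl ((PySem.Dict.contains_iff_mem_keys _ _).1 h))
  simp [h2]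

theorem nodup_overwrite (d : PySem.Dict String String) (m hit : String)
    (h : d.keys.Nodup) :
    ((d.update (d.keys.map (fun k => (k, m)))).setdefault hit m).keys.Nodup :=
  nodup_keys_setdefault _ _ _ (PySem.Dict.nodup_keys_update _ _ h)

theorem pvFindMono_nodup (s : PySem.Dict String String) (ref : String) (L : List String)
    (d : PySem.Dict String String) (h : d.keys.Nodup) :
    (pvFindMono s ref L d).2.1.keys.Nodup := by
  unfold pvFindMono
  split
  · split
    · dsimp only
      exact nodup_keys_setdefault _ _ _ (nodup_keys_setdefault _ _ _ h)
    · dsimp only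
      exact nodup_keys_setdefault _ _ _ h
  · split
    · dsimp only
      exact nodup_overwrite _ _ _ h
    · exact h

theorem pvLoopB_nodup (s : PySem.Dict String String) (ref : String) (L : List String)
    (d : PySem.Dict String String) (h : d.keys.Nodup) :
    (pvLoopB s ref L d).2.keys.Nodup := by
  revert h
  fun_induction pvLoopB s ref L d with
  | case1 L d L1 d1 hf =>
    intro h
    have := pvFindMono_nodup s ref L d h
    rw [hf] at this
    exact this
  | case2 L d L1 d1 hf ih =>
    intro h
    have := pvFindMono_nodup s ref L d h
    rw [hf] at this
    exact ih this

-- B's while loop is A's step function iterated, whenever ref is a key of d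
theorem altLoop_eq (s : PySem.Dict String String) (ref : String) :
    ∀ (n : Nat) (L : List String) (d : PySem.Dict String String), L.length ≤ n →
      d.contains ref = true → altLoop s ref L d = pvLoopB s ref L d := by
  intro n
  induction n with
  | zero =>
    intro L d hL hc
    have hnil : L = [] := List.eq_nil_of_length_eq_zero (Nat.le_zero.1 hL)
    subst hnil
    have hsome : (PySem.Dict.get? d ref).isSome = true := by
      rw [← PySem.Dict.contains_eq_isSome_get?]; exact hc
    obtain ⟨mid, hmid⟩ := Option.isSome_iff_exists.1 hsome
    have hpf : pvFindMono s ref [] d = ([], d, true) := by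
      simp only [pvFindMono, hmid]; rfl
    rw [altLoop, pvLoopB, hpf]
    rfl
  | succ n ih =>
    intro L d hL hc
    have hsome : (PySem.Dict.get? d ref).isSome = true := by
      rw [← PySem.Dict.contains_eq_isSome_get?]; exact hc
    obtain ⟨mid, hmid⟩ := Option.isSome_iff_exists.1 hsome
    have hmom : (PySem.Dict.get? d ref).getD "" = mid := by rw [hmid]; rfl
    rw [altLoop]
    split
    · -- find? = none: both sides terminal
      rename_i hh
      rw [hmom] at hh
      have hpf : pvFindMono s ref L d = (L, d, true) := by
        simp only [pvFindMono, hmid, hh]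
      rw [pvLoopB, hpf]
    · -- find? = some hit: both sides take one identical step, then induction
      rename_i hit hh
      rw [hmom] at hh
      have hmem : hit ∈ L := List.mem_of_find?_eq_some hh
      have hpf : pvFindMono s ref L d =
          (pvRemoveID L hit,
           (d.update (d.keys.map (fun k =>
             (k, (PySem.Dict.get? s mid).getD "")))).setdefault
             hit ((PySem.Dict.get? s mid).getD ""), false) := by
        simp only [pvFindMono, hmid, hh]
      rw [pvLoopB, hpf]
      simp only [hmom]
      rw [altSwapOut_eq _ _ hmem]
      refine ih _ _ ?_ (contains_overwrite _ _ _ _ hc)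
      rw [length_pvRemoveID]
      have := List.length_pos_of_mem hmem
      omega

-- B's flush over keys equals A's flush over items (keys are unique)
theorem altFlush_eq (d : PySem.Dict String String) (M : PySem.Dict String (List String))
    (hnd : d.keys.Nodup) :
    d.keys.foldl (fun M t =>
      (M.setdefault ((PySem.Dict.get? d t).getD "") []).modify
        ((PySem.Dict.get? d t).getD "") [] (fun xs => xs ++ [t])) M = pvFlush d M := by
  unfold pvFlush
  rw [PySem.Dict.items_eq_map_keys d hnd "", List.foldl_map]
  congr 1

-- ===== VERDICT (by name: the statement is the Claim_ definition above) =====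
-- the reorder arms agree: B's two comprehensions are A's reordering pass
theorem reorder_arm_eq (l ter mono : List String) :
    (if l.isEmpty then l
     else ter.filter (fun t => l.contains t && mono.contains t)
          ++ ter.filter (fun t => l.contains t && !(mono.contains t))) =
    (if l.length > 0 then pvReorder ter l mono else l) := by
  by_cases h : l = []
  · simp [h]
  · have : 0 < l.length := List.length_pos_of_ne_nil h
    simp [List.isEmpty_iff, h, this, pvReorder_eq]

theorem make_MRCA_targetID_dic_spec : Claim_equal_make_MRCA_targetID_dic := by
  unfold Claim_equal_make_MRCA_targetID_dic
  intro sd ref L d0l M0l ter mono _ hpre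
  unfold Spec_make_MRCA_targetID_dic make_MRCA_targetID_dic make_MRCA_targetID_dic_alt
  rw [core_eq]
  simp only []
  set s := PySem.Dict.ofList sd with hs
  set d0 := PySem.Dict.ofList d0l with hd0
  have hnd0 : d0.keys.Nodup := PySem.Dict.nodup_keys_ofList _
  have hpred : (fun t => !(t == ref) && (PySem.Dict.get? s ref == PySem.Dict.get? s t))
      = (fun t => !(ref == t) && (PySem.Dict.get? s ref == PySem.Dict.get? s t)) := by
    funext t; rw [BEq.comm]
  -- the B pipeline state after the loop equals A's iterated step function
  have hp : (let step0 : List String × PySem.Dict String String × Bool :=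
      match PySem.Dict.get? d0 ref with
      | some _ => (L, d0, false)
      | none =>
        match L.find? (fun t => !(t == ref) && (PySem.Dict.get? s ref == PySem.Dict.get? s t)) with
        | none => (altSwapOut L ref, d0.insert ref ref, true)
        | some hit =>
          let L1 := if L.contains ref then altSwapOut L ref else L
          let m := (PySem.Dict.get? s ref).getD ""
          (altSwapOut L1 hit, (d0.setdefault ref m).setdefault hit m, false)
      if step0.2.2 then (step0.1, step0.2.1) else altLoop s ref step0.1 step0.2.1)
      = pvLoopB s ref L d0 := by
    cases hg : PySem.Dict.get? d0 ref with
    | some v =>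
      simp only []
      have hc : d0.contains ref = true := by
        rw [PySem.Dict.contains_eq_isSome_get?, hg]; rfl
      exact altLoop_eq s ref L.length L d0 le_rfl hc
    | none =>
      have hcf : d0.contains ref = false := by
        rw [PySem.Dict.contains_eq_isSome_get?, hg]; rfl
      simp only [hpred]
      cases hfind : L.find? (fun t => !(ref == t) && (PySem.Dict.get? s ref == PySem.Dict.get? s t)) with
      | none =>
        simp only []
        -- terminal singleton case; Pre_ supplies ref ∈ L
        have hrefL : ref ∈ L := by
          rcases List.eq_nil_or_concat L with hnil | -
          · exact absurd (hpre.1 hnil) (by rw [← hd0]; simp [hcf])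
          all_goals
          rcases hpre.2 (by intro hnil; exact absurd (hpre.1 hnil) (by rw [← hd0]; simp [hcf])) with
            ⟨-, hall⟩ | ⟨-, -, -, himp⟩
          · cases L with
            | nil => exact absurd (hpre.1 rfl) (by rw [← hd0]; simp [hcf])
            | cons a L' => exact (hall a (List.mem_cons_self)) ▸ List.mem_cons_self
          · refine (himp (by rw [← hd0]; exact hcf)).2 ?_
            rintro ⟨t, htL, htne, hteq⟩
            have hnone := List.find?_eq_none.1 hfind t htL
            apply hnone
            have h1 : (ref == t) = false := by
              simpa using fun h : ref = t => htne h.symm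
            have h2 : (PySem.Dict.get? s ref == PySem.Dict.get? s t) = true := by
              rw [hteq]; exact beq_self_eq_true _
            simp [h1, h2]
        have hpf : pvFindMono s ref L d0 = (pvRemoveID L ref, d0.setdefault ref ref, true) := by
          simp only [pvFindMono, hg, hfind]
        rw [pvLoopB, hpf, altSwapOut_eq _ _ hrefL,
            PySem.Dict.setdefault_of_not_contains d0 ref hcf]
        exact if_pos trivial
      | some hit =>
        simp only []
        have hmem : hit ∈ L := List.mem_of_find?_eq_some hfind
        have hne : ref ≠ hit := by
          have := List.find?_some hfind
          intro h
          simp [h] at this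
        have hpf : pvFindMono s ref L d0 =
            (pvRemoveID (if L.contains ref then pvRemoveID L ref else L) hit,
             (d0.setdefault ref ((PySem.Dict.get? s ref).getD "")).setdefault hit
               ((PySem.Dict.get? s ref).getD ""), false) := by
          simp only [pvFindMono, hg, hfind]
        rw [pvLoopB, hpf]
        dsimp only
        have hL1 : (if L.contains ref = true then altSwapOut L ref else L)
            = (if L.contains ref = true then pvRemoveID L ref else L) := by
          by_cases hcl : L.contains ref = true
          · simp only [hcl, if_true]
            exact altSwapOut_eq _ _ (by simpa using hcl)
          · have href : ref ∉ L := by simpa using hcl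
            simp [href]
        rw [hL1]
        have hmem1 : hit ∈ (if L.contains ref = true then pvRemoveID L ref else L) := by
          by_cases hcl : L.contains ref = true
          · simp only [hcl, if_true]
            exact mem_pvRemoveID_of_ne L hit ref hmem (by simpa using hcl) (Ne.symm hne)
          · have href : ref ∉ L := by simpa using hcl
            simp [href, hmem]
        rw [altSwapOut_eq _ _ hmem1]
        apply altLoop_eq s ref
          (pvRemoveID (if L.contains ref = true then pvRemoveID L ref else L) hit).length _ _ le_rfl
        rw [PySem.Dict.contains_setdefault, PySem.Dict.contains_setdefault]
        simp
  rw [hp, reorder_arm_eq, altFlush_eq _ _ (pvLoopB_nodup s ref L d0 hnd0)]
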